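-- pv_equiv track=rewrite | github.com/Ohashi1409/Listas---IP | Lista 5/Q3.py | verificador_tentativa
-- ===== SOURCE A (Python) =====
-- def verificador_tentativa(palavra, byte):
--     acertou = False
--     nova_palavra = palavra[:8]
--     if len(palavra) < 8:
--         acertou = False
--     elif byte == nova_palavra:
--         acertou = True
--     else:
--         palavra = palavra[1:]
--         acertou = verificador_tentativa(palavra, byte)
--
--     return acertou
-- ===== SOURCE B (Python) =====
-- def verificador_tentativa(palavra, byte):
--     return any(palavra[i:i+8] == byte for i in range(len(palavra) - 7))
-- ===== Notes on version B (the rewrite author's own statement) =====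
-- stated objective: faster
-- what changed: Replaces the tail recursion that copies the remaining string on every call with a single any() over window start positions i in range(len(palavra)-7), comparing palavra[i:i+8] to byte; the empty range reproduces the len<8 guard.
import Mathlib
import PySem

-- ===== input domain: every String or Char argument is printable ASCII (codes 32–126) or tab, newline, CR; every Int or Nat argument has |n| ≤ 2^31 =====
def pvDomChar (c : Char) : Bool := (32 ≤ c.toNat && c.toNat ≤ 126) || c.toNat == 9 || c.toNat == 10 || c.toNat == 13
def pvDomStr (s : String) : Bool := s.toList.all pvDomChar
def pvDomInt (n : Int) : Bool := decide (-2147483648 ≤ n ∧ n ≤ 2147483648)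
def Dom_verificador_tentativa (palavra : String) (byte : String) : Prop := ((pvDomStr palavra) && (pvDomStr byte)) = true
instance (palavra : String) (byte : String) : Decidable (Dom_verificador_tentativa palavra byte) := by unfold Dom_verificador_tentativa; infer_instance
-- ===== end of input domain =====

-- B replaces A's tail recursion with an any() over window start positions (avoids copying the whole remaining string at every step).
-- ===== PORT A =====
-- recursion on the code-point list: palavra[:8] = take 8, palavra[1:] = tail (PySem string ops are defined over List Char)
def pvGoA (l : List Char) (b : List Char) : Bool :=
  if l.length < 8 then false
  else if b == l.take 8 then true
  else pvGoA l.tail b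
termination_by l.length
decreasing_by simp [List.length_tail]; omega

def verificador_tentativa (palavra : String) (byte : String) : Bool :=
  pvGoA palavra.toList byte.toList

-- ===== PORT B =====
-- any(palavra[i:i+8] == byte for i in range(len(palavra) - 7)); palavra[i:i+8] = (drop i).take 8
def verificador_tentativa_alt (palavra : String) (byte : String) : Bool :=
  (List.range (palavra.toList.length - 7)).any
    (fun i => (palavra.toList.drop i).take 8 == byte.toList)

-- ===== PRECONDITION & SPEC =====
def Spec_verificador_tentativa (palavra : String) (byte : String) (out : Bool) : Prop := out = verificador_tentativa_alt palavra byte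
instance (palavra : String) (byte : String) (out : Bool) : Decidable (Spec_verificador_tentativa palavra byte out) := by unfold Spec_verificador_tentativa; infer_instance

-- ===== CLAIM (what is proved, stated in full; the proofs are below) =====
def Claim_equal_verificador_tentativa : Prop := ∀ (palavra : String) (byte : String), Dom_verificador_tentativa palavra byte → Spec_verificador_tentativa palavra byte (verificador_tentativa palavra byte)

-- ===== LEMMAS AND PROOFS =====

-- ===== VERDICT (by name: the statement is the Claim_ definition above) =====
theorem pvGoA_eq (l b : List Char) :
    pvGoA l b = (List.range (l.length - 7)).any (fun i => (l.drop i).take 8 == b) := by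
  induction l using pvGoA.induct b with
  | case1 l h =>
    rw [pvGoA]
    simp only [h, if_true]
    have : l.length - 7 = 0 := by omega
    simp [this]
  | case2 l h he =>
    rw [pvGoA]
    simp only [h, if_false, he, if_true]
    have h8 : l.length - 7 = (l.length - 8) + 1 := by omega
    rw [h8, List.range_succ_eq_map]
    simp only [beq_iff_eq] at he
    simp [he]
  | case3 l h he ih =>
    rw [pvGoA]
    simp only [h, if_false, he, if_false]
    rw [ih]
    have h8 : l.length - 7 = (l.length - 8) + 1 := by omega
    rw [h8, List.range_succ_eq_map]
    have ht : l.tail.length - 7 = l.length - 8 := by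
      simp [List.length_tail]; omega
    rw [ht]
    simp only [List.any_cons, List.any_map]
    have hz : ((l.drop 0).take 8 == b) = false := by
      simp only [List.drop_zero, beq_eq_false_iff_ne, ne_eq]
      intro hc
      exact he (by simp [hc])
    rw [hz]
    simp only [Bool.false_eq_true, if_false]
    congr 1
    funext i
    simp [Function.comp, List.drop_tail, Nat.succ_eq_add_one]

theorem verificador_tentativa_spec : Claim_equal_verificador_tentativa := by
  intro palavra byte _
  unfold Spec_verificador_tentativa verificador_tentativa verificador_tentativa_alt
  exact pvGoA_eq _ _
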